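-- pv_equiv track=rewrite | github.com/tkdlek0501/algorithm_python | 9st_week/fail/2025_05_29_carpet.py | solution
-- ===== SOURCE A (Python) =====
-- def solution(brown, yellow):
--     answer = []
--
--     a = 0  # 가로
--     b = 0  # 세로
--     # a * b = brown + yellow
--
--     # for 문 범위?
--     sum_by = brown + yellow
--     # 곱해서 sum 값을 만들 수 있는 값 찾기
--     possible_comb = []
--     for num in range(1, sum_by + 1):
--         if sum_by % num == 0:
--             possible_comb.append((num, int(sum_by / num)))
--     idx = len(possible_comb) // 2
--     a, b = possible_comb[idx]
--
--     answer.append(a)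
--     answer.append(b)
--
--     return answer
-- ===== SOURCE B (Python) =====
-- def solution(brown, yellow):
--     # The middle divisor pair of n = brown + yellow is (n // d, d) where d is
--     # the largest divisor of n not exceeding sqrt(n): scan i = 2, 3, ... while
--     # i*i <= n instead of enumerating all n candidates.
--     n = brown + yellow
--     d = 1
--     i = 2
--     while i * i <= n:
--         if n % i == 0:
--             d = i
--         i += 1
--     return [n // d, d]
-- ===== Notes on version B (the rewrite author's own statement) =====
-- stated objective: faster
-- what changed: Instead of building the full list of all divisor pairs of n=brown+yellow by trial division up to n and indexing its middle, B scans i only while i*i <= n keeping the largest divisor d <= sqrt(n) and returns [n//d, d] directly, with no list at all.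
import Mathlib
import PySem

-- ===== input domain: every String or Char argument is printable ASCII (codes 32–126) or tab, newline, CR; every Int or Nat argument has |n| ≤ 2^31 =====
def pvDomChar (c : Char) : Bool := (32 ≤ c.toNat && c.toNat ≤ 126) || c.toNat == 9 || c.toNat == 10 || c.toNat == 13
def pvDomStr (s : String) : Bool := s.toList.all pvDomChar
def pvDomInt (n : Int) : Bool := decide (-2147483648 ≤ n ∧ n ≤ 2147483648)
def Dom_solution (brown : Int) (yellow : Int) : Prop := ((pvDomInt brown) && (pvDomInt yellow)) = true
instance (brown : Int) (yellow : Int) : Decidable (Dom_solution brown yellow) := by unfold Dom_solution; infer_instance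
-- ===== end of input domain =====

-- B replaces A's full trial division up to n (building every divisor pair and indexing the
-- middle) by a scan of i while i*i ≤ n that keeps the largest divisor d ≤ √n and returns
-- [n // d, d] directly; objective: faster (O(√n) instead of O(n)).

-- ===== PORT A =====
def solution (brown : Int) (yellow : Int) : List Int :=
  let sum_by := brown + yellow
  let possible_comb : List (Int × Int) :=
    (PySem.List.pyRange 1 (sum_by + 1) 1).foldl
      (fun acc num =>
        if PySem.Int.mod sum_by num = 0 then
          -- int(sum_by / num): float division then truncation; exact = floor division here
          -- since num divides sum_by and |sum_by| ≤ 2^33 < 2^53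
          acc ++ [(num, PySem.Int.floordiv sum_by num)]
        else acc) []
  let idx : Nat := possible_comb.length / 2
  match PySem.List.pyGet? possible_comb (idx : Int) with
  | some ab => [ab.1, ab.2]   -- answer = [a, b]
  | none => []                -- IndexError (empty possible_comb); excluded by Pre_

-- ===== PORT B =====
-- the 'while i * i <= n' loop of Source B; the extra '2 ≤ i' in the guard only secures
-- termination and is invariant (the loop starts at i = 2 and increments i)
def solutionAltLoop (n : Int) (i : Int) (d : Int) : Int :=
  if h : 2 ≤ i ∧ i * i ≤ n then
    solutionAltLoop n (i + 1) (if PySem.Int.mod n i = 0 then i else d)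
  else d
termination_by (n + 1 - i * i).toNat
decreasing_by
  obtain ⟨h2, hle⟩ := h
  have : i * i < (i + 1) * (i + 1) := by nlinarith
  omega

def solution_alt (brown : Int) (yellow : Int) : List Int :=
  let n := brown + yellow
  let d := solutionAltLoop n 2 1
  [PySem.Int.floordiv n d, d]

-- ===== PRECONDITION & SPEC =====
-- A raises IndexError when brown + yellow ≤ 0 (no divisor pair exists); exactly those inputs are excluded.
def Pre_solution (brown : Int) (yellow : Int) : Prop := 1 ≤ brown + yellow
instance (brown : Int) (yellow : Int) : Decidable (Pre_solution brown yellow) := by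
  unfold Pre_solution; infer_instance

def pvWitness_solution : Int × Int := (10, 2)

def Spec_solution (brown : Int) (yellow : Int) (out : List Int) : Prop := out = solution_alt brown yellow
instance (brown : Int) (yellow : Int) (out : List Int) : Decidable (Spec_solution brown yellow out) := by unfold Spec_solution; infer_instance

-- ===== CLAIM (what is proved, stated in full; the proofs are below) =====
def Claim_equal_solution : Prop := ∀ (brown : Int) (yellow : Int), Dom_solution brown yellow → Pre_solution brown yellow → Spec_solution brown yellow (solution brown yellow)

-- ===== LEMMAS AND PROOFS =====

-- the ascending list of positive divisors of n that A's loop collects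
def pvDivs (n : Int) : List Int :=
  (PySem.List.pyRange 1 (n + 1) 1).filter (fun x => decide (PySem.Int.mod n x = 0))

theorem pvDivs_mem {n x : Int} (hn : 1 ≤ n) : x ∈ pvDivs n ↔ 1 ≤ x ∧ x ∣ n := by
  unfold pvDivs
  rw [List.mem_filter]
  simp only [PySem.List.mem_pyRange_one, decide_eq_true_eq, PySem.Int.mod_eq_zero_iff_dvd]
  constructor
  · rintro ⟨⟨h1, _⟩, h3⟩; exact ⟨h1, h3⟩
  · rintro ⟨h1, h3⟩
    exact ⟨⟨h1, by have := Int.le_of_dvd (by omega) h3; omega⟩, h3⟩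

theorem pvDivs_pairwise (n : Int) : (pvDivs n).Pairwise (· < ·) :=
  (PySem.List.pairwise_lt_pyRange_one 1 (n + 1)).filter _

theorem pvDivs_nodup (n : Int) : (pvDivs n).Nodup :=
  (pvDivs_pairwise n).imp (fun h => ne_of_lt h)

theorem pvDivs_ne_nil {n : Int} (hn : 1 ≤ n) : pvDivs n ≠ [] := by
  have : (1 : Int) ∈ pvDivs n := (pvDivs_mem hn).2 ⟨le_refl 1, one_dvd n⟩
  exact List.ne_nil_of_mem this

theorem pvDivs_div_facts {n x : Int} (hn : 1 ≤ n) (hx : x ∈ pvDivs n) :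
    (n / x) * x = n ∧ 1 ≤ n / x ∧ n / x ∣ n ∧ n / (n / x) = x := by
  obtain ⟨hx1, hxd⟩ := (pvDivs_mem hn).1 hx
  have hmul : (n / x) * x = n := Int.ediv_mul_cancel hxd
  have hq1 : 1 ≤ n / x := by nlinarith
  have hqd : n / x ∣ n := ⟨x, hmul.symm⟩
  have hqq : n / (n / x) = x := by
    have := Int.mul_ediv_cancel_left x (show n / x ≠ 0 by omega)
    calc n / (n / x) = ((n / x) * x) / (n / x) := by rw [hmul]
    _ = x := this
  exact ⟨hmul, hq1, hqd, hqq⟩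

theorem pvDivs_antitone {n x y : Int} (hn : 1 ≤ n) (hx : x ∈ pvDivs n) (hy : y ∈ pvDivs n)
    (hlt : x < y) : n / y < n / x := by
  obtain ⟨hmx, hqx1, _, _⟩ := pvDivs_div_facts hn hx
  obtain ⟨hmy, hqy1, _, _⟩ := pvDivs_div_facts hn hy
  obtain ⟨hx1, _⟩ := (pvDivs_mem hn).1 hx
  nlinarith

-- the divisor map x ↦ n / x reverses A's divisor list
theorem pvDivs_map_div_eq_reverse {n : Int} (hn : 1 ≤ n) :
    (pvDivs n).map (fun x => n / x) = (pvDivs n).reverse := by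
  have hmemmap : ∀ z, z ∈ (pvDivs n).map (fun x => n / x) ↔ z ∈ pvDivs n := by
    intro z
    simp only [List.mem_map]
    constructor
    · rintro ⟨x, hx, rfl⟩
      obtain ⟨_, hq1, hqd, _⟩ := pvDivs_div_facts hn hx
      exact (pvDivs_mem hn).2 ⟨hq1, hqd⟩
    · intro hz
      obtain ⟨_, hq1, hqd, hqq⟩ := pvDivs_div_facts hn hz
      exact ⟨n / z, (pvDivs_mem hn).2 ⟨hq1, hqd⟩, hqq⟩
  have hpwmap : ((pvDivs n).map (fun x => n / x)).Pairwise (· > ·) := by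
    refine List.pairwise_map.2 ?_
    exact (pvDivs_pairwise n).imp_of_mem (by
      intro a b ha hb hab
      exact pvDivs_antitone hn ha hb hab)
  have hnodupmap : ((pvDivs n).map (fun x => n / x)).Nodup :=
    hpwmap.imp (fun h => ne_of_gt h)
  have hperm : ((pvDivs n).map (fun x => n / x)).reverse.Perm (pvDivs n) := by
    refine (List.perm_ext_iff_of_nodup (by simpa using hnodupmap) (pvDivs_nodup n)).2 ?_
    intro z
    rw [List.mem_reverse]
    exact hmemmap z
  have h1 : PySem.List.sorted (pvDivs n) (fun x => x)
      = ((pvDivs n).map (fun x => n / x)).reverse :=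
    PySem.List.sorted_eq_of_perm_of_pairwise_lt _ _ _ hperm (by
      rw [List.pairwise_reverse]
      exact hpwmap.imp (fun h => h))
  have h2 : PySem.List.sorted (pvDivs n) (fun x => x) = pvDivs n :=
    PySem.List.sorted_eq_of_perm_of_pairwise_lt _ _ _ (List.Perm.refl _) (pvDivs_pairwise n)
  have h3 := h1.symm.trans h2
  calc (pvDivs n).map (fun x => n / x)
      = ((pvDivs n).map (fun x => n / x)).reverse.reverse := by rw [List.reverse_reverse]
    _ = (pvDivs n).reverse := by rw [h3]

theorem pvDivs_getElem_div {n : Int} (hn : 1 ≤ n) (i : Nat) (h : i < (pvDivs n).length) :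
    n / (pvDivs n)[i] = (pvDivs n)[(pvDivs n).length - 1 - i]'(by omega) := by
  have := congrArg (fun l => l[i]?) (pvDivs_map_div_eq_reverse hn)
  simp only [List.getElem?_map, List.getElem?_reverse h] at this
  rw [List.getElem?_eq_getElem h, List.getElem?_eq_getElem (by omega)] at this
  simpa using this

theorem pvDivs_mono {n : Int} (i j : Nat) (hij : i ≤ j) (h : j < (pvDivs n).length) :
    (pvDivs n)[i]'(by omega) ≤ (pvDivs n)[j] := by
  rcases Nat.lt_or_ge i j with hlt | hge
  · exact le_of_lt ((List.pairwise_iff_getElem.1 (pvDivs_pairwise n)) i j (by omega) h hlt)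
  · have : i = j := by omega
    subst this; exact le_refl _

-- s is the middle divisor: the largest divisor of n whose square does not exceed n
def pvIsMid (n s : Int) : Prop :=
  1 ≤ s ∧ s ∣ n ∧ s * s ≤ n ∧ ∀ j, 1 ≤ j → j ∣ n → j * j ≤ n → j ≤ s

theorem pvIsMid_getElem {n : Int} (hn : 1 ≤ n) :
    pvIsMid n ((pvDivs n)[((pvDivs n).length - 1) / 2]'(by
      have := List.length_pos_of_ne_nil (pvDivs_ne_nil hn); omega)) := by
  have hm : 1 ≤ (pvDivs n).length := List.length_pos_of_ne_nil (pvDivs_ne_nil hn)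
  set m := (pvDivs n).length with hmdef
  set k := (m - 1) / 2 with hkdef
  have hk : k < m := by omega
  have hsmem : (pvDivs n)[k] ∈ pvDivs n := List.getElem_mem hk
  obtain ⟨hs1, hsd⟩ := (pvDivs_mem hn).1 hsmem
  obtain ⟨hmul, hq1, _, _⟩ := pvDivs_div_facts hn hsmem
  have hdivk := pvDivs_getElem_div hn k hk
  have hle : (pvDivs n)[k] ≤ (pvDivs n)[m - 1 - k]'(by omega) :=
    pvDivs_mono k (m - 1 - k) (by omega) (by omega)
  refine ⟨hs1, hsd, ?_, ?_⟩
  · rw [hdivk] at hmul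
    nlinarith
  · intro j hj1 hjd hjj
    have hjmem : j ∈ pvDivs n := (pvDivs_mem hn).2 ⟨hj1, hjd⟩
    obtain ⟨t, ht, hjt⟩ := List.mem_iff_getElem.1 hjmem
    have htk : t ≤ k := by
      by_contra hgt
      rw [Nat.not_le] at hgt
      have h2 : m - 1 - t < t := by omega
      have hlt : (pvDivs n)[m - 1 - t]'(by omega) < (pvDivs n)[t] :=
        (List.pairwise_iff_getElem.1 (pvDivs_pairwise n)) _ _ (by omega) ht h2
      have hdivt := pvDivs_getElem_div hn t ht
      obtain ⟨hmult, _, _, _⟩ := pvDivs_div_facts hn hjmem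
      rw [hjt] at hdivt hlt
      rw [hdivt] at hmult
      nlinarith [hlt, hmult, hjj, hj1]
    calc j = (pvDivs n)[t] := hjt.symm
      _ ≤ (pvDivs n)[k] := pvDivs_mono t k htk hk

theorem solutionAltLoop_eq {n s : Int} (hs : pvIsMid n s) :
    ∀ (i d : Int), 2 ≤ i → 1 ≤ d → d ∣ n → d * d ≤ n →
      (∀ j, 1 ≤ j → j ∣ n → j * j ≤ n → j < i → j ≤ d) →
      solutionAltLoop n i d = s := by
  obtain ⟨hs1, hsd, hssq, hsmax⟩ := hs
  have hbase : ∀ i d, 2 ≤ i → ¬ i * i ≤ n → 1 ≤ d → d ∣ n → d * d ≤ n →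
      (∀ j, 1 ≤ j → j ∣ n → j * j ≤ n → j < i → j ≤ d) → d = s := by
    intro i d h2 hstop hd1 hdd hdsq hmax
    have hsi : s < i := by nlinarith
    exact le_antisymm (hsmax d hd1 hdd hdsq) (hmax s hs1 hsd hssq hsi)
  have main : ∀ fuel (i d : Int), (n + 1 - i * i).toNat ≤ fuel → 2 ≤ i → 1 ≤ d → d ∣ n →
      d * d ≤ n → (∀ j, 1 ≤ j → j ∣ n → j * j ≤ n → j < i → j ≤ d) →
      solutionAltLoop n i d = s := by
    intro fuel
    induction fuel with
    | zero =>
      intro i d hf h2 hd1 hdd hdsq hmax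
      have hstop : ¬ (2 ≤ i ∧ i * i ≤ n) := by omega
      rw [solutionAltLoop, dif_neg hstop]
      exact hbase i d h2 (by omega) hd1 hdd hdsq hmax
    | succ f ih =>
      intro i d hf h2 hd1 hdd hdsq hmax
      by_cases hc : 2 ≤ i ∧ i * i ≤ n
      · rw [solutionAltLoop, dif_pos hc]
        have hii : i * i < (i + 1) * (i + 1) := by nlinarith
        by_cases hdvd : PySem.Int.mod n i = 0
        · have hidvd : i ∣ n := (PySem.Int.mod_eq_zero_iff_dvd n i).1 hdvd
          rw [if_pos hdvd]
          refine ih (i + 1) i (by omega) (by omega) (by omega) hidvd hc.2 ?_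
          intro j hj1 hjd hjj hji
          omega
        · rw [if_neg hdvd]
          refine ih (i + 1) d (by omega) (by omega) hd1 hdd hdsq ?_
          intro j hj1 hjd hjj hji
          rcases lt_or_eq_of_le (show j ≤ i by omega) with hlt | heq
          · exact hmax j hj1 hjd hjj hlt
          · exfalso
            exact hdvd ((PySem.Int.mod_eq_zero_iff_dvd n i).2 (heq ▸ hjd))
      · rw [solutionAltLoop, dif_neg hc]
        exact hbase i d h2 (by intro hle; exact hc ⟨h2, hle⟩) hd1 hdd hdsq hmax
  intro i d
  exact main (n + 1 - i * i).toNat i d (le_refl _)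

-- A's accumulator loop collects exactly the filtered, mapped divisor list
theorem solution_foldl (n : Int) (l : List Int) (acc : List (Int × Int)) :
    l.foldl (fun acc num => if PySem.Int.mod n num = 0 then
        acc ++ [(num, PySem.Int.floordiv n num)] else acc) acc
    = acc ++ (l.filter (fun x => decide (PySem.Int.mod n x = 0))).map
        (fun x => (x, PySem.Int.floordiv n x)) := by
  induction l generalizing acc with
  | nil => simp
  | cons a l ih =>
    simp only [List.foldl_cons, List.filter_cons]
    by_cases h : PySem.Int.mod n a = 0
    · simp [h, ih]
    · simp [h, ih]

theorem solution_main (brown yellow : Int) (hn : 1 ≤ brown + yellow) :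
    solution brown yellow = solution_alt brown yellow := by
  simp only [solution, solution_alt, solution_foldl, List.nil_append]
  rw [show List.filter (fun x => decide (PySem.Int.mod (brown + yellow) x = 0))
      (PySem.List.pyRange 1 (brown + yellow + 1) 1) = pvDivs (brown + yellow) from rfl]
  set n := brown + yellow with hndef
  set D := pvDivs n with hDdef
  set m := D.length with hmdef
  have hm : 1 ≤ m := List.length_pos_of_ne_nil (pvDivs_ne_nil hn)
  set k := (m - 1) / 2 with hkdef
  have hk : k < m := by omega
  have hmid : pvIsMid n (D[k]'hk) := pvIsMid_getElem hn
  have hloop : solutionAltLoop n 2 1 = D[k]'hk :=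
    solutionAltLoop_eq hmid 2 1 (le_refl 2) (le_refl 1) (one_dvd n) (by omega)
      (fun j hj1 _ _ hj2 => by omega)
  have hkm : (pvDivs n).length = m := hmdef.symm
  have hidx2 : m / 2 < m := by omega
  have hdivk : n / (D[k]'hk) = D[m / 2]'hidx2 := by
    have h := pvDivs_getElem_div hn k (by omega)
    have hidxeq : (pvDivs n).length - 1 - k = m / 2 := by omega
    have hopt : (pvDivs n)[(pvDivs n).length - 1 - k]? = (pvDivs n)[m / 2]? := by
      rw [hidxeq]
    rw [List.getElem?_eq_getElem (show (pvDivs n).length - 1 - k < (pvDivs n).length by omega),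
      List.getElem?_eq_getElem (show m / 2 < (pvDivs n).length by omega)] at hopt
    exact h.trans (Option.some_injective _ hopt)
  have hkmem : D[k]'hk ∈ pvDivs n := List.getElem_mem hk
  obtain ⟨_, hq1, _, hqq⟩ := pvDivs_div_facts hn hkmem
  have hmidmem : D[m / 2]'hidx2 ∈ pvDivs n := List.getElem_mem hidx2
  obtain ⟨hmid1, _⟩ := (pvDivs_mem hn).1 hmidmem
  have hflen : (D.map (fun x => (x, PySem.Int.floordiv n x))).length = m := by
    rw [List.length_map]
  have hget : PySem.List.pyGet? (D.map (fun x => (x, PySem.Int.floordiv n x)))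
      (((D.map (fun x => (x, PySem.Int.floordiv n x))).length / 2 : Nat) : Int)
      = some (D[m / 2]'hidx2, PySem.Int.floordiv n (D[m / 2]'hidx2)) := by
    rw [PySem.List.pyGet?_natCast, List.getElem?_eq_getElem (by rw [hflen]; omega)]
    simp [hflen]
  rw [hloop, hget]
  have hfd1 : PySem.Int.floordiv n (D[m / 2]'hidx2) = n / D[m / 2]'hidx2 :=
    PySem.Int.floordiv_eq_ediv_of_pos (lt_of_lt_of_le Int.zero_lt_one hmid1)
  have hfd2 : PySem.Int.floordiv n (D[k]'hk) = n / D[k]'hk :=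
    PySem.Int.floordiv_eq_ediv_of_pos (lt_of_lt_of_le Int.zero_lt_one hmid.1)
  simp only [hfd1, hfd2, hdivk]
  rw [← hdivk, hqq]

-- ===== VERDICT (by name: the statement is the Claim_ definition above) =====
theorem solution_spec : Claim_equal_solution := by
  intro brown yellow _ hpre
  exact solution_main brown yellow hpre
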